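-- pv_equiv track=rewrite | github.com/Yujir0k/OmniSub2026-lipRead-Case | scripts/apply_wordnorm_from_beam.py | apply_wordnorm
-- ===== SOURCE A (Python) =====
-- def apply_wordnorm(text: str) -> str:
--     # Exact rule used to produce submission_run_char_warmstart_beam30_wordnorm.csv
--     token_map = {"e": "the", "o": "of"}
--     toks = [token_map.get(t, t) for t in str(text).split()]
--
--     # Limit consecutive repeats (e.g. "a a a a" -> "a a")
--     out = []
--     prev = None
--     cnt = 0
--     for t in toks:
--         if t == prev:
--             cnt += 1
--         else:
--             prev = t
--             cnt = 1
--         if cnt <= 2: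
--             out.append(t)
--     return " ".join(out).strip()
-- ===== SOURCE B (Python) =====
-- def apply_wordnorm(text: str) -> str:
--     # Group-then-emit: scan each run of equal tokens with an inner index loop
--     # and emit the token once (run of 1) or twice (run >= 2).
--     token_map = {"e": "the", "o": "of"}
--     toks = [token_map.get(t, t) for t in str(text).split()]
--     pieces = []
--     i = 0
--     n = len(toks)
--     while i < n:
--         j = i + 1
--         while j < n and toks[j] == toks[i]:
--             j += 1
--         pieces.append(toks[i])
--         if j - i >= 2:
--             pieces.append(toks[i])
--         i = j
--     return " ".join(pieces)
-- ===== Notes on version B (the rewrite author's own statement) =====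
-- stated objective: alternative
-- what changed: Replaces A's prev/cnt state-machine scan (with a trailing strip) by grouping: an index loop finds each maximal run of equal tokens and emits the token once or twice per run, joining directly without strip.
import Mathlib
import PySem

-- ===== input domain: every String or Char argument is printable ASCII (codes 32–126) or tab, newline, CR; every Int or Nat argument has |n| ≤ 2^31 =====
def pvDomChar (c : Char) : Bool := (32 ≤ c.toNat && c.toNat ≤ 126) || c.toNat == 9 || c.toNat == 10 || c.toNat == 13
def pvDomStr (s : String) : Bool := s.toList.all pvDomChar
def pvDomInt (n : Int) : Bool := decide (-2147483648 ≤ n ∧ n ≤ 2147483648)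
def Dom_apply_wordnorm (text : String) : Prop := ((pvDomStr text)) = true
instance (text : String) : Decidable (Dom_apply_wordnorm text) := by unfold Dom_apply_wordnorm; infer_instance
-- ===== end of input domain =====

-- B replaces A's prev/cnt state-machine (plus trailing strip) by a run-grouping loop that emits each
-- run's token once or twice; alternative decomposition, same O(n) cost, return values proved equal.

-- ===== PORT A =====
-- one loop step of A: state = (out, prev, cnt)
def pvStepA (st : List String × Option String × Int) (t : String) : List String × Option String × Int :=
  let pc : Option String × Int := if some t == st.2.1 then (st.2.1, st.2.2 + 1) else (some t, 1)
  (if pc.2 ≤ 2 then st.1 ++ [t] else st.1, pc.1, pc.2)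

def apply_wordnorm (text : String) : String :=
  let token_map : PySem.Dict String String := PySem.Dict.mk [("e", "the"), ("o", "of")]
  let toks := (PySem.Str.split₀ text).map (fun t => token_map.getD t t)
  let res := toks.foldl pvStepA ([], none, 0)
  PySem.Str.strip (PySem.Str.join " " res.1)

-- ===== PORT B =====
-- the run-grouping loop of Source B: the inner while that advances j over the run is the
-- takeWhile/dropWhile split of the remainder at the current token
def pvEmitRuns : List String → List String
  | [] => []
  | t :: rest =>
    let run := rest.takeWhile (fun x => x == t)
    let tail := rest.dropWhile (fun x => x == t)
    (if 1 ≤ run.length then [t, t] else [t]) ++ pvEmitRuns tail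
termination_by l => l.length
decreasing_by
  simp only [List.length_cons]
  exact Nat.lt_succ_of_le (List.length_dropWhile_le _ _)

def apply_wordnorm_alt (text : String) : String :=
  let token_map : PySem.Dict String String := PySem.Dict.mk [("e", "the"), ("o", "of")]
  let toks := (PySem.Str.split₀ text).map (fun t => token_map.getD t t)
  PySem.Str.join " " (pvEmitRuns toks)

-- ===== PRECONDITION & SPEC =====
def Spec_apply_wordnorm (text : String) (out : String) : Prop := out = apply_wordnorm_alt text
instance (text : String) (out : String) : Decidable (Spec_apply_wordnorm text out) := by unfold Spec_apply_wordnorm; infer_instance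

-- ===== CLAIM (what is proved, stated in full; the proofs are below) =====
def Claim_equal_apply_wordnorm : Prop := ∀ (text : String), Dom_apply_wordnorm text → Spec_apply_wordnorm text (apply_wordnorm text)

-- ===== LEMMAS AND PROOFS =====

theorem pv_dropWhile_head {α : Type} (p : α → Bool) (l : List α) (u : α) (r : List α)
    (h : l.dropWhile p = u :: r) : p u = false := by
  induction l with
  | nil => simp at h
  | cons a l ihl =>
    rw [List.dropWhile_cons] at h
    by_cases hp : p a = true
    · rw [if_pos hp] at h; exact ihl h
    · rw [if_neg hp] at h
      cases h
      simpa using hp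

-- property of every piece we join: nonempty, no whitespace character
def pvGoodTok (w : String) : Prop := w.toList ≠ [] ∧ ∀ c ∈ w.toList, PySem.Chars.isspace c = false

theorem pv_foldl_run_ge2 (k : Nat) (t : String) (out : List String) (c : Int) (hc : 2 ≤ c) :
    List.foldl pvStepA (out, some t, c) (List.replicate k t) = (out, some t, c + k) := by
  induction k generalizing c with
  | zero => simp
  | succ k ih =>
    simp only [List.replicate_succ, List.foldl_cons]
    have hstep : pvStepA (out, some t, c) t = (out, some t, c + 1) := by
      simp only [pvStepA, BEq.rfl, if_true]
      have : ¬ (c + 1 ≤ 2) := by omega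
      simp [this]
    rw [hstep, ih (c + 1) (by omega)]
    have : c + 1 + (k : Int) = c + (k + 1 : Nat) := by push_cast; ring
    rw [this]

theorem pv_foldl_run_one (k : Nat) (t : String) (out : List String) :
    List.foldl pvStepA (out, some t, 1) (List.replicate k t)
      = ((if 1 ≤ k then out ++ [t] else out), some t, (1 : Int) + k) := by
  cases k with
  | zero => simp
  | succ k =>
    simp only [List.replicate_succ, List.foldl_cons]
    have hstep : pvStepA (out, some t, 1) t = (out ++ [t], some t, 2) := by
      simp [pvStepA]
    rw [hstep, pv_foldl_run_ge2 k t (out ++ [t]) 2 (le_refl 2)]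
    simp
    omega

theorem pv_main (n : Nat) (toks : List String) (hn : toks.length ≤ n) (out : List String)
    (prev : Option String) (cnt : Int)
    (hfresh : ∀ t rest, toks = t :: rest → prev ≠ some t) :
    (List.foldl pvStepA (out, prev, cnt) toks).1 = out ++ pvEmitRuns toks := by
  induction n generalizing toks out prev cnt with
  | zero =>
    have h0 : toks = [] := List.eq_nil_of_length_eq_zero (Nat.le_zero.mp hn)
    subst h0
    simp [pvEmitRuns]
  | succ n ih =>
    cases toks with
    | nil => simp [pvEmitRuns]
    | cons t rest =>
      have hne : prev ≠ some t := hfresh t rest rfl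
      have hbeq : (some t == prev) = false :=
        beq_eq_false_iff_ne.mpr (fun h => hne h.symm)
      have hstep : pvStepA (out, prev, cnt) t = (out ++ [t], some t, 1) := by
        simp [pvStepA, hbeq]
      rw [List.foldl_cons, hstep]
      have hdecomp : rest = rest.takeWhile (fun x => x == t) ++ rest.dropWhile (fun x => x == t) :=
        (List.takeWhile_append_dropWhile).symm
      have hrep : rest.takeWhile (fun x => x == t)
          = List.replicate (rest.takeWhile (fun x => x == t)).length t := by
        rw [List.eq_replicate_iff]
        refine ⟨rfl, fun b hb => ?_⟩
        have h2 := List.mem_takeWhile_imp (p := fun x => x == t) (l := rest) hb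
        exact eq_of_beq h2
      conv_lhs => rw [hdecomp, List.foldl_append, hrep]
      rw [pv_foldl_run_one]
      have hfresh' : ∀ u r, rest.dropWhile (fun x => x == t) = u :: r → (some t : Option String) ≠ some u := by
        intro u r h hcontra
        have hpu := pv_dropWhile_head (fun x => x == t) rest u r h
        have : t = u := Option.some.inj hcontra
        subst this
        simp at hpu
      have hlen : (rest.dropWhile (fun x => x == t)).length ≤ n := by
        have h1 := List.length_dropWhile_le (fun x => x == t) rest
        simp only [List.length_cons] at hn
        omega
      rw [ih _ hlen _ _ _ hfresh']
      by_cases h1 : 1 ≤ (rest.takeWhile (fun x => x == t)).length <;>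
        simp [pvEmitRuns, h1]

theorem pv_emitRuns_subset_aux (n : Nat) :
    ∀ l : List String, l.length ≤ n → ∀ x ∈ pvEmitRuns l, x ∈ l := by
  induction n with
  | zero =>
    intro l hl x hx
    have h0 : l = [] := List.eq_nil_of_length_eq_zero (Nat.le_zero.mp hl)
    subst h0
    simp [pvEmitRuns] at hx
  | succ n ih =>
    intro l hl x hx
    cases l with
    | nil => simp [pvEmitRuns] at hx
    | cons t rest =>
      simp only [pvEmitRuns] at hx
      rcases List.mem_append.mp hx with h | h
      · have hx2 : x = t := by split at h <;> simp at h <;> tauto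
        simp [hx2]
      · have hlen : (rest.dropWhile (fun x => x == t)).length ≤ n := by
          have := List.length_dropWhile_le (fun x => x == t) rest
          simp only [List.length_cons] at hl
          omega
        have hx2 := ih _ hlen x h
        exact List.mem_cons_of_mem _ ((List.dropWhile_sublist _).mem hx2)

theorem pv_emitRuns_subset (l : List String) (x : String) (hx : x ∈ pvEmitRuns l) : x ∈ l :=
  pv_emitRuns_subset_aux l.length l le_rfl x hx

theorem pv_go_good (s cur : List Char) (acc : List (List Char))
    (hcur : ∀ c ∈ cur, PySem.Chars.isspace c = false)
    (hacc : ∀ t ∈ acc, t ≠ [] ∧ ∀ c ∈ t, PySem.Chars.isspace c = false) :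
    ∀ t ∈ PySem.Chars.split₀.go s cur acc, t ≠ [] ∧ ∀ c ∈ t, PySem.Chars.isspace c = false := by
  induction s generalizing cur acc with
  | nil =>
    intro t ht
    simp only [PySem.Chars.split₀.go] at ht
    by_cases hc : cur.isEmpty
    · rw [if_pos hc, List.mem_reverse] at ht
      exact hacc t ht
    · rw [if_neg hc, List.mem_reverse] at ht
      rcases List.mem_cons.mp ht with h | h
      · subst h
        refine ⟨by simpa [List.isEmpty_iff] using hc, fun c hc' => hcur c (List.mem_reverse.mp hc')⟩
      · exact hacc t h
  | cons c rest ih =>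
    intro t ht
    simp only [PySem.Chars.split₀.go] at ht
    by_cases hsp : PySem.Chars.isspace c = true
    · rw [if_pos hsp] at ht
      by_cases hc : cur.isEmpty
      · rw [if_pos hc] at ht
        exact ih [] acc (by simp) hacc t ht
      · rw [if_neg hc] at ht
        refine ih [] (cur.reverse :: acc) (by simp) ?_ t ht
        intro u hu
        rcases List.mem_cons.mp hu with h | h
        · subst h
          exact ⟨by simpa [List.isEmpty_iff] using hc, fun d hd => hcur d (List.mem_reverse.mp hd)⟩
        · exact hacc u h
    · rw [if_neg hsp] at ht
      refine ih (c :: cur) acc ?_ hacc t ht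
      intro d hd
      rcases List.mem_cons.mp hd with h | h
      · subst h; simpa using hsp
      · exact hcur d h

theorem pv_split_good (s : String) (w : String) (hw : w ∈ PySem.Str.split₀ s) : pvGoodTok w := by
  unfold PySem.Str.split₀ at hw
  rcases List.mem_map.mp hw with ⟨cs, hcs, rfl⟩
  have hg := pv_go_good s.toList [] [] (by simp) (by simp) cs
    (by unfold PySem.Chars.split₀ at hcs; exact hcs)
  unfold pvGoodTok
  simpa using hg

theorem pv_map_good (t : String) (h : pvGoodTok t) :
    pvGoodTok ((PySem.Dict.mk [("e", "the"), ("o", "of")]).getD t t) := by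
  have hval : (PySem.Dict.mk [("e", "the"), ("o", "of")]).getD t t
      = if "e" == t then "the" else if "o" == t then "of" else t := by
    rw [PySem.Dict.getD_eq_get?_getD, PySem.Dict.get?_mk_cons, PySem.Dict.get?_mk_cons]
    split_ifs <;> simp_all [PySem.Dict.get?]
  rw [hval]
  split_ifs with h1 h2
  · unfold pvGoodTok
    refine ⟨by simp, ?_⟩
    intro c hc
    simp only [String.toList] at hc
    fin_cases hc <;> rfl
  · unfold pvGoodTok
    refine ⟨by simp, ?_⟩
    intro c hc
    simp only [String.toList] at hc
    fin_cases hc <;> rfl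
  · exact h

theorem pv_strip_noop (l : List Char)
    (h1 : ∀ c, l.head? = some c → PySem.Chars.isspace c = false)
    (h2 : ∀ c, l.getLast? = some c → PySem.Chars.isspace c = false) :
    PySem.Chars.strip l = l := by
  cases l with
  | nil => rfl
  | cons a t =>
    have ha : PySem.Chars.isspace a = false := h1 a rfl
    unfold PySem.Chars.strip PySem.Chars.lstrip PySem.Chars.rstrip
    rw [List.dropWhile_cons_of_neg (by simp [ha])]
    obtain ⟨d, r, hr⟩ : ∃ d r, (a :: t).reverse = d :: r := by
      cases hrev : (a :: t).reverse with
      | nil => simp at hrev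
      | cons d r => exact ⟨d, r, rfl⟩
    have hd : (a :: t).getLast? = some d := by
      rw [← List.head?_reverse, hr]; rfl
    have hds := h2 d hd
    rw [hr, List.dropWhile_cons_of_neg (by simp [hds]), ← hr, List.reverse_reverse]

theorem pv_join_head_ex (sep w : List Char) (rest : List (List Char)) :
    ∃ X, PySem.Chars.join sep (w :: rest) = w ++ X := by
  cases rest with
  | nil => exact ⟨[], by simp [PySem.Chars.join_singleton]⟩
  | cons y zs =>
    exact ⟨sep ++ PySem.Chars.join sep (y :: zs), by
      rw [PySem.Chars.join_cons_cons, List.append_assoc]⟩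

theorem pv_join_last (sep : List Char) (ws : List (List Char)) (hne : ∀ w ∈ ws, w ≠ [])
    (c : Char) (hc : (PySem.Chars.join sep ws).getLast? = some c) : ∃ w ∈ ws, c ∈ w := by
  induction ws with
  | nil => rw [PySem.Chars.join_nil] at hc; simp at hc
  | cons w rest ih =>
    cases rest with
    | nil =>
      rw [PySem.Chars.join_singleton] at hc
      exact ⟨w, by simp, List.mem_of_mem_getLast? hc⟩
    | cons y zs =>
      rw [PySem.Chars.join_cons_cons] at hc
      have hy : PySem.Chars.join sep (y :: zs) ≠ [] := by
        obtain ⟨X, hX⟩ := pv_join_head_ex sep y zs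
        rw [hX]
        simp [hne y (by simp)]
      rw [List.getLast?_append_of_ne_nil _ hy] at hc
      obtain ⟨u, hu, hcu⟩ := ih (fun v hv => hne v (List.mem_cons_of_mem _ hv)) hc
      exact ⟨u, List.mem_cons_of_mem _ hu, hcu⟩

theorem pv_strip_join (pieces : List String) (h : ∀ w ∈ pieces, pvGoodTok w) :
    PySem.Str.strip (PySem.Str.join " " pieces) = PySem.Str.join " " pieces := by
  have hne : ∀ w ∈ pieces.map String.toList, w ≠ [] := by
    intro w hw
    obtain ⟨p, hpmem, hpw⟩ := List.mem_map.mp hw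
    exact hpw ▸ (h p hpmem).1
  have hstrip : PySem.Chars.strip (PySem.Chars.join " ".toList (pieces.map String.toList))
      = PySem.Chars.join " ".toList (pieces.map String.toList) := by
    apply pv_strip_noop
    · intro c hc
      cases hp : pieces.map String.toList with
      | nil => rw [hp, PySem.Chars.join_nil] at hc; simp at hc
      | cons w rest =>
        obtain ⟨X, hX⟩ := pv_join_head_ex " ".toList w rest
        rw [hp, hX] at hc
        have hwmem : w ∈ pieces.map String.toList := hp ▸ List.mem_cons_self (l := rest)
        have hwne : w ≠ [] := hne w hwmem
        have hcw : c ∈ w := by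
          cases w with
          | nil => exact absurd rfl hwne
          | cons a l =>
            simp only [List.cons_append, List.head?_cons, Option.some.injEq] at hc
            simp [← hc]
        obtain ⟨p, hpmem, hpw⟩ := List.mem_map.mp hwmem
        exact (h p hpmem).2 c (hpw ▸ hcw)
    · intro c hc
      obtain ⟨w, hw, hcw⟩ := pv_join_last " ".toList _ hne c hc
      obtain ⟨p, hpmem, hpw⟩ := List.mem_map.mp hw
      exact (h p hpmem).2 c (hpw ▸ hcw)
  show String.ofList (PySem.Chars.strip (PySem.Str.join " " pieces).toList) = PySem.Str.join " " pieces
  rw [PySem.Str.toList_join, hstrip]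
  rfl

-- ===== VERDICT (by name: the statement is the Claim_ definition above) =====
theorem apply_wordnorm_spec : Claim_equal_apply_wordnorm := by
  intro text _
  unfold Spec_apply_wordnorm
  show PySem.Str.strip (PySem.Str.join " " _) = _
  rw [pv_main _ _ le_rfl [] none 0 (by intro t rest h; simp)]
  simp only [List.nil_append]
  apply pv_strip_join
  intro w hw
  have hw2 := pv_emitRuns_subset _ _ hw
  rcases List.mem_map.mp hw2 with ⟨t, ht, rfl⟩
  exact pv_map_good t (pv_split_good text t ht)
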